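-- pv_equiv track=rewrite | github.com/key2/amaranth-fp | src/amaranth_fp/operators/fix_real_shift_add.py | _to_csd
-- ===== SOURCE A (Python) =====
-- def _to_csd(value: int, width: int) -> list[int]:
--     """Convert integer to CSD (canonical signed digit) representation.
--
--     Returns list of digits in {-1, 0, 1} from LSB to MSB.
--     """
--     digits = []
--     carry = 0
--     for i in range(width + 1):
--         bit = ((value >> i) & 1) + carry
--         carry = 0
--         if bit >= 2:
--             bit -= 2
--             carry = 1
--         if bit == 1 and i < width and ((value >> (i + 1)) & 1):
--             digits.append(-1)
--             carry = 1
--         else: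
--             digits.append(bit)
--     return digits
-- ===== SOURCE B (Python) =====
-- def _to_csd(value: int, width: int) -> list[int]:
--     """Convert integer to CSD (canonical signed digit) representation.
--
--     Returns list of digits in {-1, 0, 1} from LSB to MSB.
--     """
--     digits = []
--     n = value
--     for i in range(width + 1):
--         if i < width and (n & 3) == 3:
--             digits.append(-1)
--             n += 1
--         else:
--             digits.append(n & 1)
--         n >>= 1
--     return digits
-- ===== Notes on version B (the rewrite author's own statement) =====
-- stated objective: alternative
-- what changed: B drops A's explicit carry flag and per-step re-reads of value's bits: it threads the shrinking number itself as the loop state, emitting -1 and incrementing when its low two bits are 11, then halving each step.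
import Mathlib
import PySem

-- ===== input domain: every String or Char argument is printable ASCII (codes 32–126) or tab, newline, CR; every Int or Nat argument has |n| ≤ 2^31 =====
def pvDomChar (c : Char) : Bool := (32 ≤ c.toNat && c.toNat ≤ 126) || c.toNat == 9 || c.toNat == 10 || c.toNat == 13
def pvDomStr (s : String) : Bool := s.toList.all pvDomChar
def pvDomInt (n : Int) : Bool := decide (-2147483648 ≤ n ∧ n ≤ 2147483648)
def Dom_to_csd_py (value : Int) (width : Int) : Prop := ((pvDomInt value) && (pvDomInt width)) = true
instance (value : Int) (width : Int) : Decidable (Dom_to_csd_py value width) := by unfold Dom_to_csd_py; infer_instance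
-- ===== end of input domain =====

-- B replaces A's explicit carry + re-reading of value's bits by a value-reduction loop that
-- shrinks the number itself (append -1 and increment when the low two bits are 11), same cost,
-- different decomposition (objective: alternative).

-- ===== PORT A =====
-- loop of A: state = (digits so far, reversed for O(1) append, carry); i counts up, fuel = remaining iterations
def toCsdLoopA (value : Int) (width : Int) : Nat → Nat → List Int → Int → List Int
  | 0, _, digits, _ => digits
  | fuel+1, i, digits, carry =>
    let bit0 := PySem.Int.band (value >>> i) 1 + carry
    let bit := if 2 ≤ bit0 then bit0 - 2 else bit0
    let carry1 := if 2 ≤ bit0 then (1:Int) else 0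
    if bit = 1 ∧ (i:Int) < width ∧ PySem.Int.band (value >>> (i+1)) 1 ≠ 0 then
      toCsdLoopA value width fuel (i+1) ((-1:Int) :: digits) 1
    else
      toCsdLoopA value width fuel (i+1) (bit :: digits) carry1

def to_csd_py (value : Int) (width : Int) : List Int :=
  (toCsdLoopA value width (width + 1).toNat 0 [] 0).reverse

-- ===== PORT B =====
-- loop of B: state = (digits so far, reversed for O(1) append, remaining value n); n += 1 then n >>= 1 in the -1 branch
def toCsdLoopB (width : Int) : Nat → Nat → List Int → Int → List Int
  | 0, _, digits, _ => digits
  | fuel+1, i, digits, n =>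
    if (i:Int) < width ∧ PySem.Int.band n 3 = 3 then
      toCsdLoopB width fuel (i+1) ((-1:Int) :: digits) ((n + 1) >>> (1:Nat))
    else
      toCsdLoopB width fuel (i+1) (PySem.Int.band n 1 :: digits) (n >>> (1:Nat))

def to_csd_py_alt (value : Int) (width : Int) : List Int :=
  (toCsdLoopB width (width + 1).toNat 0 [] value).reverse

-- ===== PRECONDITION & SPEC =====
def Spec_to_csd_py (value : Int) (width : Int) (out : List Int) : Prop := out = to_csd_py_alt value width
instance (value : Int) (width : Int) (out : List Int) : Decidable (Spec_to_csd_py value width out) := by unfold Spec_to_csd_py; infer_instance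

-- ===== CLAIM (what is proved, stated in full; the proofs are below) =====
def Claim_equal_to_csd_py : Prop := ∀ (value : Int) (width : Int), Dom_to_csd_py value width → Spec_to_csd_py value width (to_csd_py value width)

-- ===== LEMMAS AND PROOFS =====

lemma band_one_emod (x : Int) : PySem.Int.band x 1 = x % 2 := by
  rw [PySem.Int.band_one, PySem.Int.mod_eq_emod_of_pos]; norm_num

lemma nat_and_three (n : Nat) : n &&& 3 = n % 4 := by
  have := Nat.and_two_pow_sub_one_eq_mod n 2
  norm_num at this
  exact this

lemma band_three_emod (x : Int) : PySem.Int.band x 3 = x % 4 := by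
  unfold PySem.Int.band
  by_cases hx : 0 ≤ x
  · simp only [hx, if_true, show (0:Int) ≤ 3 by norm_num, if_true]
    rw [show ((3:Int).toNat) = 3 from rfl, nat_and_three]
    omega
  · simp only [hx, if_false, show (0:Int) ≤ 3 by norm_num, if_true]
    rw [show ((3:Int).toNat) = 3 from rfl, Nat.land_comm, nat_and_three]
    omega

lemma shift_one (x : Int) : x >>> (1:Nat) = x / 2 := by
  simp [Int.shiftRight_eq_div_pow]

lemma shift_succ (v : Int) (i : Nat) : v >>> (i+1) = (v >>> i) / 2 := by
  have h : v >>> (i+1) = (v >>> i) >>> (1:Nat) := by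
    simp [Int.shiftRight_eq_div_pow, pow_succ, Int.ediv_ediv_of_nonneg]
  rw [h, shift_one]

lemma loopB_step (width n : Int) (f i : Nat) (d : List Int) :
    toCsdLoopB width (f+1) i d n
      = if (i:Int) < width ∧ PySem.Int.band n 3 = 3 then
          toCsdLoopB width f (i+1) ((-1:Int) :: d) ((n+1) / 2)
        else toCsdLoopB width f (i+1) (PySem.Int.band n 1 :: d) (n / 2) := by
  simp only [toCsdLoopB, shift_one]

lemma loop_eq (value width : Int) :
    ∀ (fuel i : Nat) (digits : List Int) (carry : Int), carry = 0 ∨ carry = 1 →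
      toCsdLoopA value width fuel i digits carry
        = toCsdLoopB width fuel i digits (value >>> i + carry) := by
  intro fuel
  induction fuel with
  | zero => intro i digits carry _; rfl
  | succ f ih =>
    intro i digits carry hc
    rw [loopB_step]
    simp only [toCsdLoopA, band_one_emod, band_three_emod, shift_succ]
    have hcond : ((if 2 ≤ value >>> i % 2 + carry then value >>> i % 2 + carry - 2
          else value >>> i % 2 + carry) = 1
          ∧ (i:Int) < width ∧ value >>> i / 2 % 2 ≠ 0)
        ↔ ((i:Int) < width ∧ (value >>> i + carry) % 4 = 3) := by
      split_ifs with hb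
      · constructor
        · rintro ⟨ha, hw, hb1⟩; exact ⟨hw, by omega⟩
        · rintro ⟨hw, hq⟩; exact ⟨by omega, hw, by omega⟩
      · constructor
        · rintro ⟨ha, hw, hb1⟩; exact ⟨hw, by omega⟩
        · rintro ⟨hw, hq⟩; exact ⟨by omega, hw, by omega⟩
    simp only [hcond]
    split_ifs with hB hb
    · obtain ⟨hw, hq⟩ := hB
      rw [ih (i+1) _ 1 (Or.inr rfl), shift_succ,
        show value >>> i / 2 + 1 = (value >>> i + carry + 1) / 2 by omega]
    · rw [ih (i+1) _ 1 (Or.inr rfl), shift_succ,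
        show value >>> i % 2 + carry - 2 = (value >>> i + carry) % 2 by omega,
        show value >>> i / 2 + 1 = (value >>> i + carry) / 2 by omega]
    · rw [ih (i+1) _ 0 (Or.inl rfl), shift_succ,
        show value >>> i % 2 + carry = (value >>> i + carry) % 2 by omega,
        show value >>> i / 2 + 0 = (value >>> i + carry) / 2 by omega]

-- ===== VERDICT (by name: the statement is the Claim_ definition above) =====
theorem to_csd_py_spec : Claim_equal_to_csd_py := by
  intro value width _
  show to_csd_py value width = to_csd_py_alt value width
  unfold to_csd_py to_csd_py_alt
  have h := loop_eq value width (width + 1).toNat 0 [] 0 (Or.inl rfl)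
  simpa using h
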